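-- pv_equiv track=rewrite | github.com/samoilovartem/sprint_1_async_api | etl/transform.py | get_persons_by_role
-- ===== SOURCE A (Python) =====
-- def get_persons_by_role(
--     persons: list[dict], roles: list[str]
-- ) -> dict[str, tuple[list[dict], list[str]]]:
--     persons_data_by_role = {}
--     for role in roles:
--         persons_with_role = [
--             {'id': person.get('id'), 'full_name': person.get('full_name')}
--             for person in persons
--             if person.get('role') == role
--         ]
--         names_of_persons_with_role = [
--             person.get('full_name') for person in persons_with_role
--         ]
--         persons_data_by_role[role] = (persons_with_role, names_of_persons_with_role)
--     return persons_data_by_role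
-- ===== SOURCE B (Python) =====
-- def get_persons_by_role(
--     persons: list[dict], roles: list[str]
-- ) -> dict[str, tuple[list[dict], list[str]]]:
--     # One pass over persons: group (entry, full_name) pairs by role; then one pass over roles.
--     groups = {}
--     for person in persons:
--         entry = {'id': person.get('id'), 'full_name': person.get('full_name')}
--         groups.setdefault(person.get('role'), []).append((entry, person.get('full_name')))
--     result = {}
--     for role in roles:
--         group = groups.get(role, [])
--         result[role] = ([e for e, _ in group], [n for _, n in group])
--     return result
-- ===== Notes on version B (the rewrite author's own statement) =====
-- stated objective: faster
-- what changed: Instead of scanning the whole persons list once per role, B makes a single pass over persons grouping (entry, full_name) pairs by role into a dict, then assembles each role's pair of lists by one dict lookup per role.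
import Mathlib
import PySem

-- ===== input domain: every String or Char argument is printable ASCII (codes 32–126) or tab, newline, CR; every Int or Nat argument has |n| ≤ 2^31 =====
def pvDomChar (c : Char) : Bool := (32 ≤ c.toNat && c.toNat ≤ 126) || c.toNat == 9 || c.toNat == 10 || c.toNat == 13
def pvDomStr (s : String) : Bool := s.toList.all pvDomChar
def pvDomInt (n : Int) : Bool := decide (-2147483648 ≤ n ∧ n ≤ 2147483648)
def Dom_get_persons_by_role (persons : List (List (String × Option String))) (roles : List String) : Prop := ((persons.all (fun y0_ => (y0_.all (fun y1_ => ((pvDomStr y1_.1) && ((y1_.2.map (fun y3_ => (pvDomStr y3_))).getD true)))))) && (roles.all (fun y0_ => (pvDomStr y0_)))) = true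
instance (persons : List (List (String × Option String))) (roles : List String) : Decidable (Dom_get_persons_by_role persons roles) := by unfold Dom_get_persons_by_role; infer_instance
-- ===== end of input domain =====

-- B replaces A's per-role scan of all persons by one grouping pass over persons
-- plus one assembly pass over roles (objective: faster, one pass instead of R passes).

-- person.get(k): first match in the dict, None (= none) if absent
def pvGet (p : List (String × Option String)) (k : String) : Option String :=
  ((PySem.Dict.mk p).get? k).getD none

-- {'id': person.get('id'), 'full_name': person.get('full_name')}
def pvEntry (p : List (String × Option String)) : List (String × Option String) :=
  [("id", pvGet p "id"), ("full_name", pvGet p "full_name")]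

-- ===== PORT A =====
def get_persons_by_role (persons : List (List (String × Option String))) (roles : List String) : List (String × (List (List (String × Option String))) × List (Option String)) :=
  roles.foldl (fun d role =>
    let persons_with_role :=
      (persons.filter (fun person => pvGet person "role" == some role)).map pvEntry
    let names_of_persons_with_role :=
      persons_with_role.map (fun person => pvGet person "full_name")
    PySem.Dict.insert d role (persons_with_role, names_of_persons_with_role))
    PySem.Dict.empty |>.items

-- ===== PORT B =====
def get_persons_by_role_alt (persons : List (List (String × Option String))) (roles : List String) : List (String × (List (List (String × Option String))) × List (Option String)) :=
  let groups : PySem.Dict (Option String) (List ((List (String × Option String)) × Option String)) :=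
    persons.foldl (fun d person =>
      PySem.Dict.modify d (pvGet person "role") []
        (· ++ [(pvEntry person, pvGet person "full_name")]))
      PySem.Dict.empty
  roles.foldl (fun out role =>
    let group := PySem.Dict.getD groups (some role) []
    PySem.Dict.insert out role (group.map Prod.fst, group.map Prod.snd))
    PySem.Dict.empty |>.items

-- ===== PRECONDITION & SPEC =====
def Spec_get_persons_by_role (persons : List (List (String × Option String))) (roles : List String) (out : List (String × (List (List (String × Option String))) × List (Option String))) : Prop := out = get_persons_by_role_alt persons roles
instance (persons : List (List (String × Option String))) (roles : List String) (out : List (String × (List (List (String × Option String))) × List (Option String))) : Decidable (Spec_get_persons_by_role persons roles out) := by unfold Spec_get_persons_by_role; infer_instance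

-- ===== CLAIM (what is proved, stated in full; the proofs are below) =====
def Claim_equal_get_persons_by_role : Prop := ∀ (persons : List (List (String × Option String))) (roles : List String), Dom_get_persons_by_role persons roles → Spec_get_persons_by_role persons roles (get_persons_by_role persons roles)

-- ===== LEMMAS AND PROOFS =====

-- looking up 'full_name' in a freshly built entry returns what pvGet returned on the person
theorem pvGet_pvEntry_full_name (p : List (String × Option String)) :
    pvGet (pvEntry p) "full_name" = pvGet p "full_name" := by
  simp [pvGet, pvEntry, PySem.Dict.get?_mk_cons]

-- B's grouping dict, queried at a role, yields exactly A's filtered pass over persons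
theorem groups_getD (persons : List (List (String × Option String))) (role : String) :
    PySem.Dict.getD
      (persons.foldl (fun d person =>
        PySem.Dict.modify d (pvGet person "role") []
          (· ++ [(pvEntry person, pvGet person "full_name")]))
        PySem.Dict.empty) (some role) []
    = (persons.filter (fun person => pvGet person "role" == some role)).map
        (fun person => (pvEntry person, pvGet person "full_name")) := by
  have h := PySem.Dict.getD_foldl_modify_append
    (l := persons.map (fun person => (pvGet person "role", (pvEntry person, pvGet person "full_name"))))
    (d := PySem.Dict.empty) (c := some role)
  rw [List.foldl_map] at h
  simpa [List.filter_map, Function.comp] using h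

-- ===== VERDICT (by name: the statement is the Claim_ definition above) =====
theorem get_persons_by_role_spec : Claim_equal_get_persons_by_role := by
  intro persons roles _
  unfold Spec_get_persons_by_role get_persons_by_role get_persons_by_role_alt
  apply congrArg PySem.Dict.items
  apply PySem.List.foldl_congr_mem
  intro acc role _hr
  simp [groups_getD, List.map_map, Function.comp_def, pvGet_pvEntry_full_name]
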